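-- pv_equiv track=rewrite | github.com/dmoliveira/my_opencode | scripts/completion_gates.py | marker_category
-- ===== SOURCE A (Python) =====
-- def marker_category(marker: str) -> str | None:
--     value = marker.strip().lower()
--     if not value:
--         return None
--     if "lint" in value:
--         return "lint"
--     if "test" in value:
--         return "test"
--     if any(token in value for token in ("type", "tsc", "mypy", "pyright")):
--         return "typecheck"
--     if any(token in value for token in ("build", "compile")):
--         return "build"
--     if any(token in value for token in ("security", "audit", "semgrep", "codeql")):
--         return "security"
--     return None
-- ===== SOURCE B (Python) =====
-- _TOKENS = [
--     ("lint", "lint"),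
--     ("test", "test"),
--     ("typecheck", "type"),
--     ("typecheck", "tsc"),
--     ("typecheck", "mypy"),
--     ("typecheck", "pyright"),
--     ("build", "build"),
--     ("build", "compile"),
--     ("security", "security"),
--     ("security", "audit"),
--     ("security", "semgrep"),
--     ("security", "codeql"),
-- ]
--
-- _PRIORITY = ("lint", "test", "typecheck", "build", "security")
--
--
-- def marker_category(marker: str) -> str | None:
--     value = marker.strip().lower()
--     hits = set()
--     for i in range(len(value)):
--         for category, token in _TOKENS:
--             if value[i:i + len(token)] == token:
--                 hits.add(category)
--     for category in _PRIORITY: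
--         if category in hits:
--             return category
--     return None
-- ===== Notes on version B (the rewrite author's own statement) =====
-- stated objective: alternative
-- what changed: Instead of running a separate substring search per branch, B makes one character-position scan over the string, collecting into a set every category whose token starts at the current position, and then returns the highest-priority category in the set.
import Mathlib
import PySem

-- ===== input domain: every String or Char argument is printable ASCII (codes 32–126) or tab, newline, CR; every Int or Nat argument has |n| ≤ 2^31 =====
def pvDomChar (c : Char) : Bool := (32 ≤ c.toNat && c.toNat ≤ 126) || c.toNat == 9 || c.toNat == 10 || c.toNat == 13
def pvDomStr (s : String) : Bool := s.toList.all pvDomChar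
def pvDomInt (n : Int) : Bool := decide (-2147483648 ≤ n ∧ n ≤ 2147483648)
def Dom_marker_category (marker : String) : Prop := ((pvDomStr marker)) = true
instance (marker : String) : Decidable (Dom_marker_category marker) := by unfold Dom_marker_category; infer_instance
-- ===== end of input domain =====

-- B replaces A's per-branch substring searches by ONE position scan collecting every matched
-- category into a set, then a priority lookup; objective: alternative (same cost, different algorithm).

-- ===== PORT A =====
def marker_category (marker : String) : Option String :=
  let value := PySem.Str.lower (PySem.Str.strip marker)
  if value = "" then none
  else if PySem.Str.isIn "lint" value then some "lint"
  else if PySem.Str.isIn "test" value then some "test"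
  else if ["type", "tsc", "mypy", "pyright"].any (fun t => PySem.Str.isIn t value) then some "typecheck"
  else if ["build", "compile"].any (fun t => PySem.Str.isIn t value) then some "build"
  else if ["security", "audit", "semgrep", "codeql"].any (fun t => PySem.Str.isIn t value) then some "security"
  else none

-- ===== PORT B =====
def mcTokens : List (String × String) :=
  [("lint", "lint"), ("test", "test"),
   ("typecheck", "type"), ("typecheck", "tsc"), ("typecheck", "mypy"), ("typecheck", "pyright"),
   ("build", "build"), ("build", "compile"),
   ("security", "security"), ("security", "audit"), ("security", "semgrep"), ("security", "codeql")]

def mcPriority : List String := ["lint", "test", "typecheck", "build", "security"]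

-- the scan loop: for i in range(len(value)): for (category, token) in _TOKENS: if value[i:i+len(token)] == token: hits.add(category)
-- (the string is scanned as its list of code points; value[a:b] is PySem.List.slice on that list — exact)
def mcHits (v : List Char) : PySem.Set String :=
  (PySem.List.pyRange 0 v.length 1).foldl
    (fun hits i =>
      mcTokens.foldl
        (fun hits p =>
          if PySem.List.slice v (some i) (some (i + p.2.length)) = p.2.toList
          then PySem.Set.add hits p.1 else hits)
        hits)
    PySem.Set.empty

-- for category in _PRIORITY: if category in hits: return category
def mcFirst (hits : PySem.Set String) : List String → Option String
  | [] => none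
  | c :: rest => if PySem.Set.contains hits c then some c else mcFirst hits rest

def marker_category_alt (marker : String) : Option String :=
  let value := PySem.Str.lower (PySem.Str.strip marker)
  mcFirst (mcHits value.toList) mcPriority

-- ===== PRECONDITION & SPEC =====
def Spec_marker_category (marker : String) (out : Option String) : Prop := out = marker_category_alt marker
instance (marker : String) (out : Option String) : Decidable (Spec_marker_category marker out) := by unfold Spec_marker_category; infer_instance

-- ===== CLAIM (what is proved, stated in full; the proofs are below) =====
def Claim_equal_marker_category : Prop := ∀ (marker : String), Dom_marker_category marker → Spec_marker_category marker (marker_category marker)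

-- ===== LEMMAS AND PROOFS =====

-- membership in a foldl that conditionally adds, characterised by a per-element predicate
theorem mem_foldl_of_step {α β : Type} (L : List β) (h : PySem.Set α → β → PySem.Set α)
    (P : β → Prop) (c : α) (H : ∀ s x, c ∈ h s x ↔ c ∈ s ∨ P x) :
    ∀ init : PySem.Set α, c ∈ L.foldl h init ↔ c ∈ init ∨ ∃ x ∈ L, P x := by
  induction L with
  | nil => intro init; simp
  | cons y ys ih =>
      intro init
      simp only [List.foldl_cons, ih, H, List.mem_cons]
      constructor
      · rintro ((h1 | h2) | ⟨x, hx, hPx⟩)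
        · exact Or.inl h1
        · exact Or.inr ⟨y, Or.inl rfl, h2⟩
        · exact Or.inr ⟨x, Or.inr hx, hPx⟩
      · rintro (h1 | ⟨x, (rfl | hx), hPx⟩)
        · exact Or.inl (Or.inl h1)
        · exact Or.inl (Or.inr hPx)
        · exact Or.inr ⟨x, hx, hPx⟩

theorem mem_inner_foldl (v : List Char) (i : Int) (c : String) (s : PySem.Set String) :
    c ∈ mcTokens.foldl
        (fun hits p =>
          if PySem.List.slice v (some i) (some (i + p.2.length)) = p.2.toList
          then PySem.Set.add hits p.1 else hits) s
      ↔ c ∈ s ∨ ∃ p ∈ mcTokens, p.1 = c ∧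
          PySem.List.slice v (some i) (some (i + p.2.length)) = p.2.toList := by
  refine mem_foldl_of_step mcTokens _
    (fun p => p.1 = c ∧ PySem.List.slice v (some i) (some (i + p.2.length)) = p.2.toList) c ?_ s
  intro s p
  by_cases h : PySem.List.slice v (some i) (some (i + p.2.length)) = p.2.toList
  · simp [h, PySem.Set.mem_add, eq_comm, and_comm]
  · simp [h]

theorem mem_mcHits (v : List Char) (c : String) :
    c ∈ mcHits v ↔ ∃ p ∈ mcTokens, p.1 = c ∧ ∃ i ∈ PySem.List.pyRange 0 v.length 1,
      PySem.List.slice v (some i) (some (i + p.2.length)) = p.2.toList := by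
  unfold mcHits
  rw [mem_foldl_of_step _ _
    (fun i => ∃ p ∈ mcTokens, p.1 = c ∧
      PySem.List.slice v (some i) (some (i + p.2.length)) = p.2.toList) c
    (fun s i => mem_inner_foldl v i c s)]
  simp only [PySem.Set.empty, List.not_mem_nil, false_or]
  constructor
  · rintro ⟨i, hi, p, hp, hpc, hsl⟩; exact ⟨p, hp, hpc, i, hi, hsl⟩
  · rintro ⟨p, hp, hpc, i, hi, hsl⟩; exact ⟨i, hi, p, hp, hpc, hsl⟩

-- "token found at some scanned position" = Python's 'token in value' (token nonempty)
theorem exists_slice_iff (v t : List Char) (ht : t ≠ []) :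
    (∃ i ∈ PySem.List.pyRange 0 v.length 1,
        PySem.List.slice v (some i) (some (i + t.length)) = t)
      ↔ PySem.Chars.isIn t v = true := by
  rw [← PySem.Chars.exists_prefix_drop_iff_isIn]
  constructor
  · rintro ⟨i, hi, hsl⟩
    rw [PySem.List.mem_pyRange_one] at hi
    obtain ⟨k, rfl⟩ : ∃ k : Nat, i = (k : Int) := ⟨i.toNat, by omega⟩
    refine ⟨k, ?_⟩
    rw [show ((k : Int) + (t.length : Int)) = ((k : Int) + ((t.length : Nat) : Int)) from rfl,
      PySem.List.slice_natCast_add] at hsl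
    rw [List.prefix_iff_eq_take, ← hsl]
    simp [hsl]
  · rintro ⟨j, hj⟩
    have hjlt : j < v.length := by
      by_contra h
      have : v.drop j = [] := List.drop_eq_nil_of_le (by omega)
      rw [this, List.prefix_nil] at hj
      exact ht hj
    refine ⟨(j : Int), by rw [PySem.List.mem_pyRange_one]; omega, ?_⟩
    rw [show ((j : Int) + (t.length : Int)) = ((j : Int) + ((t.length : Nat) : Int)) from rfl,
      PySem.List.slice_natCast_add]
    have := (List.prefix_iff_eq_take).mp hj
    exact this.symm

theorem contains_mcHits (value : String) (c : String) :
    PySem.Set.contains (mcHits value.toList) c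
      = mcTokens.any (fun p => decide (p.1 = c) && PySem.Str.isIn p.2 value) := by
  have hne : ∀ p ∈ mcTokens, p.2.toList ≠ [] := by decide
  rw [Bool.eq_iff_iff]
  rw [show (PySem.Set.contains (mcHits value.toList) c = true) ↔ c ∈ mcHits value.toList by
    simp [PySem.Set.contains]]
  rw [mem_mcHits]
  simp only [List.any_eq_true, Bool.and_eq_true, decide_eq_true_eq]
  constructor
  · rintro ⟨p, hp, hpc, hfound⟩
    refine ⟨p, hp, hpc, ?_⟩
    rw [PySem.Str.isIn_eq]
    exact (exists_slice_iff _ _ (hne p hp)).mp hfound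
  · rintro ⟨p, hp, hpc, hin⟩
    rw [PySem.Str.isIn_eq] at hin
    exact ⟨p, hp, hpc, (exists_slice_iff _ _ (hne p hp)).mpr hin⟩

-- the five category-level bridges
theorem contains_lint (value : String) :
    PySem.Set.contains (mcHits value.toList) "lint" = PySem.Str.isIn "lint" value := by
  rw [contains_mcHits]; simp [mcTokens]

theorem contains_test (value : String) :
    PySem.Set.contains (mcHits value.toList) "test" = PySem.Str.isIn "test" value := by
  rw [contains_mcHits]; simp [mcTokens]

theorem contains_typecheck (value : String) :
    PySem.Set.contains (mcHits value.toList) "typecheck"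
      = (["type", "tsc", "mypy", "pyright"].any (fun t => PySem.Str.isIn t value)) := by
  rw [contains_mcHits]; simp [mcTokens]

theorem contains_build (value : String) :
    PySem.Set.contains (mcHits value.toList) "build"
      = (["build", "compile"].any (fun t => PySem.Str.isIn t value)) := by
  rw [contains_mcHits]; simp [mcTokens]

theorem contains_security (value : String) :
    PySem.Set.contains (mcHits value.toList) "security"
      = (["security", "audit", "semgrep", "codeql"].any (fun t => PySem.Str.isIn t value)) := by
  rw [contains_mcHits]; simp [mcTokens]

-- ===== VERDICT (by name: the statement is the Claim_ definition above) =====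
theorem marker_category_spec : Claim_equal_marker_category := by
  intro marker _
  unfold Spec_marker_category marker_category marker_category_alt
  simp only []
  set value := PySem.Str.lower (PySem.Str.strip marker) with hv
  simp only [mcPriority, mcFirst, contains_lint, contains_test, contains_typecheck,
    contains_build, contains_security]
  by_cases hemp : value = ""
  · rw [hemp]; decide
  · simp [hemp]
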